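-- pv_equiv track=rewrite | github.com/roguh/bitburnerBoosts | codingContracts/cc472934_right.py | combination_to_ip
-- ===== SOURCE A (Python) =====
-- from typing import List, Tuple
--
-- Combination = Tuple[int, int, int]
--
-- def combination_to_ip(digits: List[int], combination: Combination) -> List[List[int]]:
--     ip = []
--     octet = []
--     for index, digit in enumerate(digits):
--         octet.append(digit)
--         if index + 1 in combination:
--             ip.append(octet)
--             octet = []
--     ip.append(octet)
--     return ip
-- ===== SOURCE B (Python) =====
-- from typing import List, Tuple
--
-- Combination = Tuple[int, int, int]
--
-- def combination_to_ip(digits: List[int], combination: Combination) -> List[List[int]]: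
--     n = len(digits)
--     boundaries = [0] + sorted(set(combination) & set(range(1, n + 1))) + [n]
--     return [digits[a:b] for a, b in zip(boundaries, boundaries[1:])]
-- ===== Notes on version B (the rewrite author's own statement) =====
-- stated objective: simpler
-- what changed: A's per-digit accumulation loop that appends to a pending octet and flushes it at break points is replaced by computing the sorted in-range break positions up front and slicing the digit list between consecutive boundaries.
import Mathlib
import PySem

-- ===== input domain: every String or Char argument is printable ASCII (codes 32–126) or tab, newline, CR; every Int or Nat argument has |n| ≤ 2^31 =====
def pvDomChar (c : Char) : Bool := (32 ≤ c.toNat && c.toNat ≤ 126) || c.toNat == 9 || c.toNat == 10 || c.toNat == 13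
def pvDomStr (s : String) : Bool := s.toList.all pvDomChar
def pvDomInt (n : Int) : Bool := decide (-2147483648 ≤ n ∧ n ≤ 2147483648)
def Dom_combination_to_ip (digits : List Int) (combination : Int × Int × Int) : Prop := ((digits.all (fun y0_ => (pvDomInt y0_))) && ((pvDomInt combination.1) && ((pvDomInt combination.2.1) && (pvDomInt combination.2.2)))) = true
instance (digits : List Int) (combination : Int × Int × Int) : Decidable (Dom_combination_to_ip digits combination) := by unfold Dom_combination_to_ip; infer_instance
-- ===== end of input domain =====

-- B replaces A's per-digit accumulation loop by computing the sorted break positions up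
-- front and slicing the digits between consecutive boundaries (objective: simpler).

-- ===== PORT A =====
-- literal port of A: fold over enumerate(digits) carrying (ip, octet);
-- 'index + 1 in combination' is the 3-way equality test of tuple membership
def combination_to_ip (digits : List Int) (combination : Int × Int × Int) : List (List Int) :=
  let st := (PySem.List.enumerate digits 0).foldl
    (fun (s : List (List Int) × List Int) p =>
      let octet := s.2 ++ [p.2]
      if p.1 + 1 == combination.1 || p.1 + 1 == combination.2.1 || p.1 + 1 == combination.2.2 then
        (s.1 ++ [octet], [])
      else
        (s.1, octet))
    ([], [])
  st.1 ++ [st.2]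

-- ===== PORT B =====
-- literal port of Source B: boundaries = [0] + sorted(set(combination) & set(range(1, n+1))) + [n];
-- return [digits[a:b] for a, b in zip(boundaries, boundaries[1:])]
def combination_to_ip_alt (digits : List Int) (combination : Int × Int × Int) : List (List Int) :=
  let n : Int := digits.length
  let boundaries : List Int :=
    [0] ++ PySem.List.sorted
      (PySem.Set.inter (PySem.Set.ofList [combination.1, combination.2.1, combination.2.2])
        (PySem.Set.ofList (PySem.List.pyRange 1 (n + 1) 1)))
      (fun x => x) false ++ [n]
  (boundaries.zip (PySem.List.slice boundaries (some 1) none)).map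
    (fun p => PySem.List.slice digits (some p.1) (some p.2))

-- ===== PRECONDITION & SPEC =====
def Spec_combination_to_ip (digits : List Int) (combination : Int × Int × Int) (out : List (List Int)) : Prop := out = combination_to_ip_alt digits combination
instance (digits : List Int) (combination : Int × Int × Int) (out : List (List Int)) : Decidable (Spec_combination_to_ip digits combination out) := by unfold Spec_combination_to_ip; infer_instance

-- ===== CLAIM (what is proved, stated in full; the proofs are below) =====
def Claim_equal_combination_to_ip : Prop := ∀ (digits : List Int) (combination : Int × Int × Int), Dom_combination_to_ip digits combination → Spec_combination_to_ip digits combination (combination_to_ip digits combination)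

-- ===== LEMMAS AND PROOFS =====

-- 'position x is a break point' (tuple membership test of A)
def pvP (c : Int × Int × Int) (x : Int) : Bool := x == c.1 || x == c.2.1 || x == c.2.2

-- A's loop body, named
def pvStep (c : Int × Int × Int) (s : List (List Int) × List Int) (p : Int × Int) :
    List (List Int) × List Int :=
  let octet := s.2 ++ [p.2]
  if pvP c (p.1 + 1) then (s.1 ++ [octet], []) else (s.1, octet)

-- A's loop as a structural recursion over the remaining digits
def pvGo (c : Int × Int × Int) : List Int → Int → List Int → List (List Int)
  | [], _, oct => [oct]
  | d :: ds, k, oct =>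
      if pvP c (k + 1) then (oct ++ [d]) :: pvGo c ds (k + 1) [] else pvGo c ds (k + 1) (oct ++ [d])

-- splitting a list at relative (1-based, sorted) break positions
def pvChunks : List Int → List Nat → List (List Int)
  | ds, [] => [ds]
  | ds, b :: bs => ds.take b :: pvChunks (ds.drop b) (bs.map (· - b))
  termination_by _ bs => bs.length

def pvConsHead (oct : List Int) : List (List Int) → List (List Int)
  | [] => [oct]
  | h :: t => (oct ++ h) :: t

-- relative break positions (1-based) in ds when scanning from absolute position k
def pvBreaks (c : Int × Int × Int) (ds : List Int) (k : Int) : List Nat :=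
  (List.range ds.length).filterMap
    (fun (i : Nat) => if pvP c (k + (i : Int) + 1) then some (i + 1) else none)

-- A's fold equals pvGo
theorem pvFoldl_go (c : Int × Int × Int) (ds : List Int) :
    ∀ (k : Int) (ip : List (List Int)) (oct : List Int),
    (let st := (PySem.List.enumerate ds k).foldl (pvStep c) (ip, oct)
     st.1 ++ [st.2]) = ip ++ pvGo c ds k oct := by
  induction ds with
  | nil => intro k ip oct; simp [PySem.List.enumerate_nil, pvGo]
  | cons d ds ih =>
    intro k ip oct
    rw [PySem.List.enumerate_cons]
    simp only [List.foldl_cons]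
    by_cases h : pvP c (k + 1)
    · simp only [pvStep, h, if_true]
      rw [ih]
      simp [pvGo, h, List.append_assoc]
    · simp only [pvStep, h]
      rw [ih]
      simp [pvGo, h]

theorem pvBreaks_cons (c : Int × Int × Int) (d : Int) (ds : List Int) (k : Int) :
    pvBreaks c (d :: ds) k =
      if pvP c (k + 1) then 1 :: (pvBreaks c ds (k + 1)).map (· + 1)
      else (pvBreaks c ds (k + 1)).map (· + 1) := by
  have key : List.filterMap
      ((fun (i : Nat) => if pvP c (k + (i : Int) + 1) then some (i + 1) else none) ∘ Nat.succ)
      (List.range ds.length) = (pvBreaks c ds (k + 1)).map (· + 1) := by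
    rw [pvBreaks, List.map_filterMap]
    apply List.filterMap_congr
    intro i _
    have h : k + ((i : Int) + 1) + 1 = k + 1 + (i : Int) + 1 := by ring
    by_cases hp : pvP c (k + 1 + (i : Int) + 1) <;> simp [h, hp]
  simp only [pvBreaks, List.length_cons, List.range_succ_eq_map, List.filterMap_cons,
    List.filterMap_map, key]
  simp only [Nat.cast_zero, add_zero]
  by_cases h : pvP c (k + 1) <;> simp [h]

theorem pvConsHead_nil (l : List Int) (bs : List Nat) :
    pvConsHead [] (pvChunks l bs) = pvChunks l bs := by
  cases bs <;> simp [pvChunks, pvConsHead]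

-- pvGo in terms of pvChunks and pvBreaks
theorem pvGo_chunks (c : Int × Int × Int) (ds : List Int) :
    ∀ (k : Int) (oct : List Int),
    pvGo c ds k oct = pvConsHead oct (pvChunks ds (pvBreaks c ds k)) := by
  induction ds with
  | nil =>
    intro k oct
    simp [pvGo, pvBreaks, pvChunks, pvConsHead]
  | cons d ds ih =>
    intro k oct
    rw [pvBreaks_cons]
    by_cases h : pvP c (k + 1)
    · rw [if_pos h]
      rw [pvGo, if_pos h, ih (k + 1) []]
      rw [pvConsHead_nil]
      have hid : (List.map ((fun x => x - 1) ∘ fun x => x + 1) (pvBreaks c ds (k + 1)))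
          = pvBreaks c ds (k + 1) := by
        apply (List.map_congr_left ?_).trans (List.map_id _)
        intro x _; simp
      have hch : pvChunks (d :: ds) (1 :: (pvBreaks c ds (k + 1)).map (· + 1)) =
          [d] :: pvChunks ds (pvBreaks c ds (k + 1)) := by
        rw [pvChunks]
        have ht : List.take 1 (d :: ds) = [d] := rfl
        have hd : List.drop 1 (d :: ds) = ds := rfl
        rw [ht, hd, List.map_map, hid]
      rw [hch]
      rfl
    · rw [if_neg h]
      rw [pvGo, if_neg h, ih (k + 1) (oct ++ [d])]
      cases hbs : pvBreaks c ds (k + 1) with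
      | nil => simp [pvChunks, pvConsHead]
      | cons b bs =>
        have hmap1 : (List.map (· + 1) bs).map (· - (b + 1)) = bs.map (· - b) := by
          rw [List.map_map]
          apply List.map_congr_left
          intro x _
          simp
        have hch : pvChunks (d :: ds) ((b + 1) :: List.map (· + 1) bs)
            = (d :: ds.take b) :: pvChunks (ds.drop b) (bs.map (· - b)) := by
          rw [pvChunks]
          have ht : List.take (b + 1) (d :: ds) = d :: ds.take b := rfl
          have hd : List.drop (b + 1) (d :: ds) = ds.drop b := rfl
          rw [ht, hd, hmap1]
        rw [List.map_cons, hch, pvChunks]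
        simp [pvConsHead]

-- membership in pvBreaks
theorem pvMem_breaks (c : Int × Int × Int) (ds : List Int) (k : Int) (m : Nat) :
    m ∈ pvBreaks c ds k ↔ 1 ≤ m ∧ m ≤ ds.length ∧ pvP c (k + (m : Int)) = true := by
  simp only [pvBreaks, List.mem_filterMap, List.mem_range]
  constructor
  · rintro ⟨i, hi, hif⟩
    by_cases h : pvP c (k + (i : Int) + 1)
    · rw [if_pos h] at hif
      obtain rfl : m = i + 1 := by injection hif; omega
      refine ⟨by omega, by omega, by rwa [show k + ((i + 1 : Nat) : Int) = k + (i : Int) + 1 by push_cast; ring]⟩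
    · rw [if_neg h] at hif; exact absurd hif (by simp)
  · rintro ⟨h1, h2, h3⟩
    refine ⟨m - 1, by omega, ?_⟩
    have he : k + ((m - 1 : Nat) : Int) + 1 = k + (m : Int) := by
      have : ((m - 1 : Nat) : Int) = (m : Int) - 1 := by omega
      rw [this]; ring
    rw [he, if_pos h3]
    congr 1
    omega

-- pvBreaks is strictly increasing
theorem pvBreaks_pairwise (c : Int × Int × Int) (ds : List Int) (k : Int) :
    (pvBreaks c ds k).Pairwise (· < ·) := by
  rw [pvBreaks, List.pairwise_filterMap]
  apply List.Pairwise.imp ?_ (List.pairwise_lt_range)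
  intro a b hab x hx y hy
  by_cases ha : pvP c (k + (a : Int) + 1) <;> simp [ha] at hx
  by_cases hb : pvP c (k + (b : Int) + 1) <;> simp [hb] at hy
  omega

-- the slicing pass over consecutive boundaries equals pvChunks (with a starting offset a)
theorem pvZipSlices (ds : List Int) :
    ∀ (bs : List Nat) (a : Nat), a ≤ ds.length → (∀ b ∈ bs, a ≤ b ∧ b ≤ ds.length) →
      bs.Pairwise (· ≤ ·) →
      (let bl : List Int := (a : Int) :: bs.map (Nat.cast) ++ [(ds.length : Int)]
       (bl.zip bl.tail).map (fun p => PySem.List.slice ds (some p.1) (some p.2)))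
      = pvChunks (ds.drop a) (bs.map (· - a)) := by
  intro bs
  induction bs with
  | nil =>
    intro a ha _ _
    show [PySem.List.slice ds (some (a : Int)) (some (ds.length : Int))] = _
    rw [PySem.List.slice_natCast, List.map_nil, pvChunks]
    congr 1
    apply List.take_of_length_le
    simp
  | cons b bs ih =>
    intro a ha hmem hpw
    have hab : a ≤ b := (hmem b (by simp)).1
    have hb : b ≤ ds.length := (hmem b (by simp)).2
    have hbs : ∀ x ∈ bs, b ≤ x := by
      intro x hx; exact List.rel_of_pairwise_cons hpw hx
    have hrec := ih b hb (fun x hx => ⟨hbs x hx, (hmem x (by simp [hx])).2⟩)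
      (List.Pairwise.sublist (List.sublist_cons_self b bs) hpw)
    simp only [List.map_cons, List.cons_append, List.tail_cons, List.zip_cons_cons] at hrec ⊢
    rw [hrec]
    have hmap : (bs.map (· - a)).map (· - (b - a)) = bs.map (· - b) := by
      rw [List.map_map]
      apply List.map_congr_left
      intro x hx
      have := hbs x hx
      simp only [Function.comp_def]
      omega
    have hchunks : pvChunks (ds.drop a) ((b - a) :: bs.map (· - a)) =
        (ds.drop a).take (b - a) :: pvChunks (ds.drop b) (bs.map (· - b)) := by
      rw [pvChunks, List.drop_drop]
      rw [show a + (b - a) = b by omega, hmap]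
    rw [hchunks, PySem.List.slice_natCast]

-- ===== VERDICT (by name: the statement is the Claim_ definition above) =====
theorem combination_to_ip_spec : Claim_equal_combination_to_ip := by
  intro digits c _
  unfold Spec_combination_to_ip
  -- A side
  have hA : combination_to_ip digits c = pvChunks digits (pvBreaks c digits 0) := by
    have h1 : combination_to_ip digits c =
        (let st := (PySem.List.enumerate digits 0).foldl (pvStep c) ([], [])
         st.1 ++ [st.2]) := rfl
    rw [h1, pvFoldl_go c digits 0 [] []]
    rw [pvGo_chunks c digits 0 [], pvConsHead_nil]
    simp
  -- B side: the sorted intersection is the (cast of the) break list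
  have hcast : ∀ {m n : Nat}, m < n → ((m : Int) < (n : Int)) := by
    intro m n h; exact_mod_cast h
  have hplt : ((pvBreaks c digits 0).map (Nat.cast : Nat → Int)).Pairwise (· < ·) := by
    rw [List.pairwise_map]
    exact (pvBreaks_pairwise c digits 0).imp hcast
  have hS : PySem.List.sorted
      (PySem.Set.inter (PySem.Set.ofList [c.1, c.2.1, c.2.2])
        (PySem.Set.ofList (PySem.List.pyRange 1 ((digits.length : Int) + 1) 1)))
      (fun x => x) false = (pvBreaks c digits 0).map (Nat.cast) := by
    apply PySem.List.sorted_eq_of_perm_of_pairwise_lt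
    · rw [List.perm_ext_iff_of_nodup]
      · intro x
        rw [List.mem_map]
        constructor
        · rintro ⟨m, hm, rfl⟩
          rw [pvMem_breaks] at hm
          obtain ⟨h1, h2, h3⟩ := hm
          rw [PySem.Set.mem_inter, PySem.Set.mem_ofList, PySem.Set.mem_ofList,
            PySem.List.mem_pyRange_one]
          simp only [zero_add] at h3
          simp only [pvP, Bool.or_eq_true, beq_iff_eq] at h3
          simp only [List.mem_cons, List.not_mem_nil, or_false]
          refine ⟨by tauto, by exact_mod_cast h1, by omega⟩
        · intro hx
          rw [PySem.Set.mem_inter, PySem.Set.mem_ofList, PySem.Set.mem_ofList,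
            PySem.List.mem_pyRange_one] at hx
          obtain ⟨hc, hx1, hx2⟩ := hx
          simp only [List.mem_cons, List.not_mem_nil, or_false] at hc
          refine ⟨x.toNat, ?_, by omega⟩
          rw [pvMem_breaks]
          refine ⟨by omega, by omega, ?_⟩
          rw [show (0 : Int) + (x.toNat : Int) = x by omega]
          simp only [pvP, Bool.or_eq_true, beq_iff_eq]
          tauto
      · exact hplt.imp (fun h => ne_of_lt h)
      · exact PySem.Set.nodup_inter _ _ (PySem.Set.nodup_ofList _)
    · exact hplt
  -- assemble
  unfold combination_to_ip_alt
  simp only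
  rw [hS]
  rw [PySem.List.slice_from_one]
  have hz := pvZipSlices digits (pvBreaks c digits 0) 0 (by omega)
    (fun b hb => ⟨Nat.zero_le b, ((pvMem_breaks c digits 0 b).mp hb).2.1⟩)
    ((pvBreaks_pairwise c digits 0).imp (fun h => le_of_lt h))
  simp only [Nat.cast_zero, List.drop_zero] at hz
  simp only [List.singleton_append]
  rw [hz, hA]
  congr 1
  simp
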